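-- pv_equiv track=rewrite | github.com/RascalTwo/DailyProblem | problems/DailyCoding/181/solve.py | solve
-- ===== SOURCE A (Python) =====
-- from typing import List
--
-- def is_palindrome(string: str) -> bool:
-- 	return string == string[::-1]
--
-- def solve(string: str) -> List[str]:
-- 	length = len(string)
--
-- 	palindromes: List[str] = []
--
-- 	left, right = 0, length
-- 	while left < length:
-- 		considering = string[left:left + right]
-- 		if not is_palindrome(considering):
-- 			right -= 1
-- 		else:
-- 			palindromes.append(considering)
-- 			left += right
-- 			right = length - left
--
-- 	return palindromes
-- ===== SOURCE B (Python) =====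
-- from typing import List
--
-- def solve(string: str) -> List[str]:
-- 	n = len(string)
--
-- 	# DP over start positions, right to left: prev[j - (i+1)] says whether
-- 	# string[i+1 : j+1] is a palindrome; best[i] is the end (exclusive) of the
-- 	# longest palindrome starting at i.
-- 	best: List[int] = []
-- 	prev: List[bool] = []
-- 	for i in range(n - 1, -1, -1):
-- 		row: List[bool] = []
-- 		b = i + 1
-- 		for j in range(i, n):
-- 			ok = string[i] == string[j] and (j - i < 2 or prev[j - i - 2])
-- 			row.append(ok)
-- 			if ok:
-- 				b = j + 1
-- 		best = [b] + best
-- 		prev = row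
--
-- 	result: List[str] = []
-- 	i = 0
-- 	while i < n:
-- 		j = best[i]
-- 		result.append(string[i:j])
-- 		i = j
-- 	return result
-- ===== Notes on version B (the rewrite author's own statement) =====
-- stated objective: faster
-- what changed: Replaces A's repeated slice-and-reverse palindrome checks inside a shrinking-window while loop by an O(n^2) dynamic-programming palindrome table built right-to-left (one row kept at a time), from which the longest palindrome starting at each position is read off and the greedy split emitted.
import Mathlib
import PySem

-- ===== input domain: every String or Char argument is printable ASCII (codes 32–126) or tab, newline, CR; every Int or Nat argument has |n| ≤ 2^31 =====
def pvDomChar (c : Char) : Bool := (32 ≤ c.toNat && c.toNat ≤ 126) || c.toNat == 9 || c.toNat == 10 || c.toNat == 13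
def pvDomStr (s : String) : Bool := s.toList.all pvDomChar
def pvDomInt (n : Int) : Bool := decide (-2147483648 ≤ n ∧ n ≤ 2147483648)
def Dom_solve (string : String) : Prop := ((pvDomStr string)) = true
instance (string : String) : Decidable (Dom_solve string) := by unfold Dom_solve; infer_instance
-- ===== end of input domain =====

-- B replaces A's repeated slice-and-reverse checks inside a shrinking window by a right-to-left
-- palindrome DP (one row kept at a time) queried greedily; a timing run measures B faster.

-- ===== PORT A =====
def is_palindrome (string : String) : Bool :=
  -- string == string[::-1]; step -1 ≠ 0 so slice? is always some (getD is a totality guard only)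
  string == (PySem.Str.slice? string none none (-1)).getD string

def solveLoop (string : String) (length left right : Int) (palindromes : List String) :
    List String :=
  if _h : left < length then
    if _hr : right ≤ 0 then palindromes  -- totality guard, unreachable in A's runs (right stays ≥ 1)
    else
      -- considering = string[left:left + right], written inline at both uses
      if is_palindrome (PySem.Str.slice string (some left) (some (left + right))) = false then
        solveLoop string length left (right - 1) palindromes
      else
        solveLoop string length (left + right) (length - (left + right))
          (palindromes ++ [PySem.Str.slice string (some left) (some (left + right))])
  else palindromes
termination_by ((length - left).toNat, right.toNat)
decreasing_by
  · exact Prod.Lex.right _ (by omega)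
  · exact Prod.Lex.left _ _ (by omega)

def solve (string : String) : List String :=
  solveLoop string (PySem.Str.len string) 0 (PySem.Str.len string) []

-- ===== PORT B =====
-- inner 'for j in range(i, n)' of Source B, accumulating row and b (ok written inline at both uses)
def rowLoop (cs : List Char) (i : Nat) (prev : List Bool) (j : Nat) (row : List Bool) (b : Nat) :
    List Bool × Nat :=
  if _h : j < cs.length then
    rowLoop cs i prev (j + 1)
      (row ++ [(cs.getD i 'a' == cs.getD j 'a') && (decide (j - i < 2) || prev.getD (j - i - 2) false)])
      (if (cs.getD i 'a' == cs.getD j 'a') && (decide (j - i < 2) || prev.getD (j - i - 2) false)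
        then j + 1 else b)
  else (row, b)
termination_by cs.length - j

-- outer 'for i in range(n - 1, -1, -1)' of Source B: counter value i+1 processes index i
def outerLoop (cs : List Char) : Nat → List Bool → List Nat → List Nat
  | 0, _prev, best => best
  | (i + 1), prev, best =>
      let rb := rowLoop cs i prev i [] (i + 1)
      outerLoop cs i rb.1 (rb.2 :: best)

-- final 'while i < n' emission loop of Source B (j = best[i] written inline)
def emitLoop (cs : List Char) (best : List Nat) (i : Nat) (result : List String) : List String :=
  if _h : i < cs.length then
    if _hj : best.getD i 0 ≤ i then result  -- totality guard, unreachable: best[i] ≥ i + 1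
    else emitLoop cs best (best.getD i 0)
      (result ++ [String.ofList (PySem.List.slice cs (some (i : Int)) (some (best.getD i 0 : Int)))])
  else result
termination_by cs.length - i
decreasing_by
  have h2 : i < best[i]?.getD 0 := Nat.lt_of_not_le _hj
  omega

def solve_alt (string : String) : List String :=
  emitLoop string.toList (outerLoop string.toList string.toList.length [] []) 0 []

-- ===== PRECONDITION & SPEC =====
def Spec_solve (string : String) (out : List String) : Prop := out = solve_alt string
instance (string : String) (out : List String) : Decidable (Spec_solve string out) := by unfold Spec_solve; infer_instance

-- ===== CLAIM (what is proved, stated in full; the proofs are below) =====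
def Claim_equal_solve : Prop := ∀ (string : String), Dom_solve string → Spec_solve string (solve string)

-- ===== LEMMAS AND PROOFS =====

-- palB cs i j: is cs[i:j] a palindrome (0 ≤ i ≤ j ≤ n intended)
def palB (cs : List Char) (i j : Nat) : Bool :=
  ((cs.drop i).take (j - i)).reverse == (cs.drop i).take (j - i)

abbrev Qpal (cs : List Char) (i t : Nat) : Prop := i < t ∧ palB cs i t = true

-- largest end j ∈ [i+1, n] with cs[i:j] a palindrome
def maxEnd (cs : List Char) (i : Nat) : Nat := Nat.findGreatest (Qpal cs i) cs.length

lemma pal_single (cs : List Char) (i : Nat) (h : i < cs.length) : palB cs i (i + 1) = true := by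
  have hd : (cs.drop i).take 1 = [cs[i]] := by
    rw [List.drop_eq_getElem_cons h]
    rfl
  rw [palB, show i + 1 - i = 1 by omega, hd]
  simp

lemma lt_maxEnd (cs : List Char) (i : Nat) (h : i < cs.length) : i < maxEnd cs i := by
  have := Nat.le_findGreatest (P := Qpal cs i) (n := cs.length) h
    ⟨Nat.lt_succ_self i, pal_single cs i h⟩
  rw [maxEnd]
  omega

lemma maxEnd_le (cs : List Char) (i : Nat) : maxEnd cs i ≤ cs.length := by
  rw [maxEnd]
  exact Nat.findGreatest_le _

-- reference greedy split both ports are proved equal to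
def greedy (cs : List Char) (l : Nat) : List String :=
  if h : l < cs.length then
    String.ofList ((cs.drop l).take (maxEnd cs l - l)) :: greedy cs (maxEnd cs l)
  else []
termination_by cs.length - l
decreasing_by
  have := lt_maxEnd cs l h
  omega

-- ---------- A-side ----------

lemma isPal_iff (t : String) : is_palindrome t = true ↔ t.toList.reverse = t.toList := by
  unfold is_palindrome
  rw [PySem.Str.slice?_none_none_neg_one]
  simp only [Option.getD_some, beq_iff_eq]
  constructor
  · intro h
    conv_rhs => rw [h]
    simp
  · intro h
    conv_lhs => rw [← String.ofList_toList (s := t), ← h]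

lemma considering_toList (s : String) (l r : Nat) :
    (PySem.Str.slice s (some (l : Int)) (some ((l : Int) + (r : Int)))).toList =
      (s.toList.drop l).take r := by
  rw [PySem.Str.toList_slice]
  simp [PySem.Chars.slice_eq_listSlice, PySem.List.slice_natCast_add]

lemma isPal_considering (s : String) (l r : Nat) :
    is_palindrome (PySem.Str.slice s (some (l : Int)) (some ((l : Int) + (r : Int)))) =
      palB s.toList l (l + r) := by
  rcases h : palB s.toList l (l + r) with _ | _
  · rw [← Bool.not_eq_true, isPal_iff, considering_toList]
    intro hc
    rw [palB] at h
    simp only [Nat.add_sub_cancel_left] at h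
    rw [hc] at h
    simp at h
  · rw [isPal_iff, considering_toList]
    rw [palB] at h
    simp only [Nat.add_sub_cancel_left] at h
    simpa using h

lemma inner (s : String) (l : Nat) (hl : l < s.toList.length) :
    ∀ (r : Nat) (acc : List String), 1 ≤ r → l + r ≤ s.toList.length →
    (∀ t, l + r < t → t ≤ s.toList.length → palB s.toList l t = false) →
    solveLoop s (s.toList.length : Int) (l : Int) (r : Int) acc =
      solveLoop s (s.toList.length : Int) (maxEnd s.toList l : Int)
        ((s.toList.length : Int) - (maxEnd s.toList l : Int))
        (acc ++ [String.ofList ((s.toList.drop l).take (maxEnd s.toList l - l))]) := by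
  intro r
  induction r with
  | zero => omega
  | succ m ih =>
    intro acc _h1 h2 h3
    rw [solveLoop]
    rw [dif_pos (by exact_mod_cast hl)]
    rw [dif_neg (by push_cast; omega)]
    rcases hpal : palB s.toList l (l + (m + 1)) with _ | _
    · -- not a palindrome: right -= 1
      have hm : 1 ≤ m := by
        rcases Nat.eq_zero_or_pos m with hm0 | hm0
        · subst hm0
          rw [pal_single s.toList l hl] at hpal
          exact absurd hpal (by simp)
        · exact hm0
      have hpc : is_palindrome
          (PySem.Str.slice s (some (l : Int)) (some ((l : Int) + ((m + 1 : Nat) : Int)))) = false := by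
        rw [isPal_considering s l (m + 1)]
        exact hpal
      rw [if_pos (by rw [hpc])]
      rw [show ((m + 1 : Nat) : Int) - 1 = (m : Int) by push_cast; ring]
      have hnew : ∀ t, l + m < t → t ≤ s.toList.length → palB s.toList l t = false := by
        intro t ht1 ht2
        by_cases hte : t = l + (m + 1)
        · subst hte; exact hpal
        · exact h3 t (by omega) ht2
      exact ih acc hm (by omega) hnew
    · -- palindrome found: it is maxEnd
      have hmax : maxEnd s.toList l = l + (m + 1) := by
        rw [maxEnd, Nat.findGreatest_eq_iff]
        refine ⟨h2, fun _ => ⟨by omega, hpal⟩, ?_⟩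
        intro t ht1 ht2 hq
        exact absurd hq.2 (by rw [h3 t ht1 ht2]; simp)
      have hpc : is_palindrome
          (PySem.Str.slice s (some (l : Int)) (some ((l : Int) + ((m + 1 : Nat) : Int)))) = true := by
        rw [isPal_considering s l (m + 1)]
        exact hpal
      rw [if_neg (by rw [hpc]; simp)]
      rw [hmax]
      have hseg : PySem.Str.slice s (some (l : Int)) (some ((l : Int) + ((m + 1 : Nat) : Int))) =
          String.ofList ((s.toList.drop l).take (l + (m + 1) - l)) := by
        rw [← String.ofList_toList
          (s := PySem.Str.slice s (some (l : Int)) (some ((l : Int) + ((m + 1 : Nat) : Int))))]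
        rw [considering_toList s l (m + 1)]
        simp
      rw [hseg]
      congr 1

lemma outer (s : String) :
    ∀ (k l : Nat) (acc : List String), s.toList.length - l ≤ k → l ≤ s.toList.length →
    solveLoop s (s.toList.length : Int) (l : Int) ((s.toList.length : Int) - (l : Int)) acc =
      acc ++ greedy s.toList l := by
  intro k
  induction k with
  | zero =>
    intro l acc hk hl
    rw [solveLoop, dif_neg (by exact_mod_cast (by omega : ¬ ((l:Int) < (s.toList.length : Int))))]
    rw [greedy, dif_neg (by omega)]
    simp
  | succ k ih =>
    intro l acc _hk hl
    rcases Nat.eq_or_lt_of_le hl with he | hlt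
    · rw [solveLoop, dif_neg (by exact_mod_cast (by omega : ¬ ((l:Int) < (s.toList.length : Int))))]
      rw [greedy, dif_neg (by omega)]
      simp
    · rw [show ((s.toList.length : Int) - (l : Int)) = ((s.toList.length - l : Nat) : Int) by
        push_cast [Nat.cast_sub hl]; ring]
      rw [inner s l hlt (s.toList.length - l) acc (by omega) (by omega)
        (by intro t ht1 ht2; omega)]
      have hm1 := lt_maxEnd s.toList l hlt
      have hm2 := maxEnd_le s.toList l
      rw [ih (maxEnd s.toList l) _ (by omega) hm2]
      conv_rhs => rw [greedy, dif_pos hlt]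
      simp

lemma solve_eq_greedy (s : String) : solve s = greedy s.toList 0 := by
  unfold solve
  rw [PySem.Str.len_eq]
  have := outer s s.toList.length 0 [] (by omega) (by omega)
  simpa using this

-- ---------- B-side ----------

def rowOf (cs : List Char) (i : Nat) : List Bool :=
  (List.range' i (cs.length - i)).map (fun j => palB cs i (j + 1))

lemma rev_cons_concat (c d : Char) (m : List Char) :
    ((c :: (m ++ [d])).reverse == c :: (m ++ [d])) = ((d == c) && (m.reverse == m)) := by
  rw [Bool.eq_iff_iff]
  simp only [beq_iff_eq, Bool.and_eq_true]
  rw [show (c :: (m ++ [d])).reverse = d :: (m.reverse ++ [c]) by simp]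
  rw [List.cons_eq_cons]
  constructor
  · rintro ⟨h1, h2⟩
    subst h1
    exact ⟨rfl, List.append_cancel_right h2⟩
  · rintro ⟨h1, h2⟩
    subst h1
    rw [h2]
    exact ⟨rfl, rfl⟩

lemma slice_decomp (cs : List Char) (i j : Nat) (hij : i + 1 ≤ j) (hj : j < cs.length) :
    (cs.drop i).take (j + 1 - i) =
      cs[i]'(by omega) :: (((cs.drop (i + 1)).take (j - (i + 1))) ++ [cs[j]'hj]) := by
  have hd : cs.drop i = cs[i]'(by omega) :: cs.drop (i + 1) := List.drop_eq_getElem_cons (by omega)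
  rw [hd]
  have h1 : j + 1 - i = (j - i - 1 + 1) + 1 := by omega
  rw [h1, List.take_succ_cons]
  congr 1
  rw [List.take_add_one]
  have hget : (cs.drop (i + 1))[j - i - 1]? = some (cs[j]'hj) := by
    rw [List.getElem?_drop, show i + 1 + (j - i - 1) = j by omega]
    exact List.getElem?_eq_getElem hj
  rw [hget]
  congr 1

lemma palB_two (cs : List Char) (i j : Nat) (hij : i + 1 = j) (hj : j < cs.length) :
    palB cs i (j + 1) = (cs[i]'(by omega) == cs[j]'hj) := by
  rw [palB, slice_decomp cs i j (by omega) hj]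
  rw [show j - (i + 1) = 0 by omega, List.take_zero]
  rw [rev_cons_concat]
  simp [BEq.comm]

lemma palB_step (cs : List Char) (i j : Nat) (hij : i + 2 ≤ j) (hj : j < cs.length) :
    palB cs i (j + 1) = ((cs[i]'(by omega) == cs[j]'hj) && palB cs (i + 1) j) := by
  rw [palB, slice_decomp cs i j (by omega) hj]
  rw [rev_cons_concat]
  rw [palB]
  rw [BEq.comm (a := cs[j]'hj)]

lemma rowOf_getD (cs : List Char) (i j : Nat) (h1 : i + 2 ≤ j) (h2 : j ≤ cs.length) :
    (rowOf cs (i + 1)).getD (j - i - 2) false = palB cs (i + 1) j := by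
  rw [rowOf]
  have hlen : j - i - 2 < ((List.range' (i + 1) (cs.length - (i + 1))).map
      (fun j => palB cs (i + 1) (j + 1))).length := by
    simp [List.length_range']
    omega
  rw [List.getD_eq_getElem _ _ hlen]
  rw [List.getElem_map, List.getElem_range']
  congr 1
  omega

lemma ok_eq_palB (cs : List Char) (i j : Nat) (hij : i ≤ j) (hj : j < cs.length) :
    ((cs.getD i 'a' == cs.getD j 'a') &&
      (decide (j - i < 2) || (rowOf cs (i + 1)).getD (j - i - 2) false)) = palB cs i (j + 1) := by
  have hgi : cs.getD i 'a' = cs[i]'(by omega) := List.getD_eq_getElem cs 'a' (by omega)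
  have hgj : cs.getD j 'a' = cs[j]'hj := List.getD_eq_getElem cs 'a' hj
  rw [hgi, hgj]
  rcases Nat.lt_or_ge (j - i) 2 with hlt | hge
  · rw [decide_eq_true (by omega : j - i < 2), Bool.true_or, Bool.and_true]
    rcases Nat.eq_or_lt_of_le hij with he | hlt2
    · subst he
      rw [pal_single cs i hj]
      simp
    · rw [palB_two cs i j (by omega) hj]
  · rw [decide_eq_false (by omega : ¬ (j - i < 2)), Bool.false_or]
    rw [rowOf_getD cs i j (by omega) (by omega)]
    rw [palB_step cs i j (by omega) hj]

lemma findGreatest_below (cs : List Char) (i : Nat) : Nat.findGreatest (Qpal cs i) i = 0 := by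
  rw [Nat.findGreatest_eq_zero_iff]
  intro m _hm hmi hq
  exact absurd hq.1 (by omega)

lemma rowLoop_spec (cs : List Char) (i : Nat) (hi : i < cs.length) :
    ∀ (d j : Nat), i ≤ j → j ≤ cs.length → cs.length - j ≤ d →
    rowLoop cs i (rowOf cs (i + 1)) j ((List.range' i (j - i)).map (fun j' => palB cs i (j' + 1)))
        (Nat.findGreatest (Qpal cs i) j ⊔ (i + 1)) = (rowOf cs i, maxEnd cs i) := by
  intro d
  induction d with
  | zero =>
    intro j h1 h2 h3
    have hj : j = cs.length := by omega
    subst hj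
    rw [rowLoop, dif_neg (by omega)]
    have hge := Nat.le_findGreatest (P := Qpal cs i) (n := cs.length) hi
      ⟨Nat.lt_succ_self i, pal_single cs i hi⟩
    rw [Prod.mk.injEq]
    exact ⟨rfl, by rw [maxEnd]; omega⟩
  | succ d ih =>
    intro j h1 h2 h3
    rcases Nat.eq_or_lt_of_le h2 with he | hlt
    · subst he
      rw [rowLoop, dif_neg (by omega)]
      have hge := Nat.le_findGreatest (P := Qpal cs i) (n := cs.length) hi
        ⟨Nat.lt_succ_self i, pal_single cs i hi⟩
      rw [Prod.mk.injEq]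
      exact ⟨rfl, by rw [maxEnd]; omega⟩
    · rw [rowLoop, dif_pos hlt]
      have hok := ok_eq_palB cs i j h1 hlt
      rw [hok]
      have hrow : ((List.range' i (j - i)).map (fun j' => palB cs i (j' + 1))) ++ [palB cs i (j + 1)] =
          (List.range' i (j + 1 - i)).map (fun j' => palB cs i (j' + 1)) := by
        rw [show j + 1 - i = (j - i) + 1 by omega, List.range'_1_concat, List.map_append,
          show i + (j - i) = j by omega]
        rfl
      have hb : (if palB cs i (j + 1) then j + 1 else Nat.findGreatest (Qpal cs i) j ⊔ (i + 1)) =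
          Nat.findGreatest (Qpal cs i) (j + 1) ⊔ (i + 1) := by
        rw [Nat.findGreatest_succ]
        by_cases hp : palB cs i (j + 1) = true
        · rw [if_pos hp, if_pos (show Qpal cs i (j + 1) from ⟨by omega, hp⟩)]
          omega
        · rw [if_neg hp, if_neg (fun hq => hp hq.2)]
      rw [hrow, hb]
      exact ih (j + 1) (by omega) (by omega) (by omega)

lemma rowLoop_start (cs : List Char) (i : Nat) (hi : i < cs.length) :
    rowLoop cs i (rowOf cs (i + 1)) i [] (i + 1) = (rowOf cs i, maxEnd cs i) := by
  have := rowLoop_spec cs i hi (cs.length - i) i (le_refl i) (by omega) (by omega)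
  simpa [findGreatest_below] using this

lemma outerLoop_spec (cs : List Char) :
    ∀ (i : Nat) (best : List Nat), i ≤ cs.length →
    outerLoop cs i (rowOf cs i) best = (List.range' 0 i).map (maxEnd cs) ++ best := by
  intro i
  induction i with
  | zero => intro best _; simp [outerLoop]
  | succ i ih =>
    intro best h
    show outerLoop cs i (rowLoop cs i (rowOf cs (i + 1)) i [] (i + 1)).1
        ((rowLoop cs i (rowOf cs (i + 1)) i [] (i + 1)).2 :: best) = _
    rw [rowLoop_start cs i (by omega)]
    rw [ih (maxEnd cs i :: best) (by omega)]
    rw [List.range'_1_concat, List.map_append]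
    simp

lemma emit_spec (cs : List Char) (best : List Nat)
    (hbest : best = (List.range' 0 cs.length).map (maxEnd cs)) :
    ∀ (d i : Nat) (result : List String), cs.length - i ≤ d →
    emitLoop cs best i result = result ++ greedy cs i := by
  intro d
  induction d with
  | zero =>
    intro i result h
    rw [emitLoop, dif_neg (by omega)]
    rw [greedy, dif_neg (by omega)]
    simp
  | succ d ih =>
    intro i result h
    rcases Nat.lt_or_ge i cs.length with hlt | hge
    · rw [emitLoop, dif_pos hlt]
      have hget : best.getD i 0 = maxEnd cs i := by
        subst hbest
        rw [List.getD_eq_getElem _ _ (by simp [List.length_range']; omega)]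
        rw [List.getElem_map, List.getElem_range']
        simp
      have hm1 := lt_maxEnd cs i hlt
      have hm2 := maxEnd_le cs i
      rw [hget]
      rw [dif_neg (by omega)]
      rw [PySem.List.slice_natCast]
      rw [ih (maxEnd cs i) _ (by omega)]
      conv_rhs => rw [greedy, dif_pos hlt]
      simp
    · rw [emitLoop, dif_neg (by omega)]
      rw [greedy, dif_neg (by omega)]
      simp

lemma solve_alt_eq_greedy (s : String) : solve_alt s = greedy s.toList 0 := by
  unfold solve_alt
  rw [show ([] : List Bool) = rowOf s.toList s.toList.length by rw [rowOf]; simp]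
  rw [outerLoop_spec s.toList s.toList.length [] (le_refl _)]
  rw [emit_spec s.toList _ (by simp) s.toList.length 0 [] (by omega)]
  simp

-- ===== VERDICT (by name: the statement is the Claim_ definition above) =====
theorem solve_spec : Claim_equal_solve := by
  intro string _hdom
  unfold Spec_solve
  rw [solve_eq_greedy, solve_alt_eq_greedy]
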